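-- pv_equiv track=rewrite | github.com/BlueHephaestus/patentator | main.py | sub_claims
-- ===== SOURCE A (Python) =====
-- def sub_claims(claim):
--     if ":" in claim:
--         parent,children = claim.split(":", 1)
--         for child in children.split(":",1)[0].split(";"):
--             for sub_claim in sub_claims(child):
--                 yield parent + sub_claim
--     else:
--         yield claim
-- ===== SOURCE B (Python) =====
-- def sub_claims(claim):
--     if ":" not in claim:
--         yield claim
--         return
--     parent, children = claim.split(":", 1)
--     for child in children.split(":", 1)[0].split(";"):
--         yield parent + child
-- ===== Notes on version B (the rewrite author's own statement) =====
-- stated objective: simpler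
-- what changed: The children produced by the split are always colon-free, so A's recursive call is a one-level no-op; B drops the recursion entirely and yields parent+child directly in one flat pass.
import Mathlib
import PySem

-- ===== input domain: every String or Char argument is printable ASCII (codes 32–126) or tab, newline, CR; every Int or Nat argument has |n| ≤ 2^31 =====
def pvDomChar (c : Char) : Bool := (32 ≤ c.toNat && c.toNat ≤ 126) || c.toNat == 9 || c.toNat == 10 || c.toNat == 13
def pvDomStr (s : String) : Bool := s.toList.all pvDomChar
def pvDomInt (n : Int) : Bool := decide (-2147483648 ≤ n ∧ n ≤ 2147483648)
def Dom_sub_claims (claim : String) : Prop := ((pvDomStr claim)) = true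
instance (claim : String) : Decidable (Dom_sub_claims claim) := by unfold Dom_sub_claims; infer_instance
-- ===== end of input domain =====

-- B drops A's one-level no-op recursion (every child is colon-free) and yields the
-- sub-claims in one flat pass; return values are identical (both Pythons are generators,
-- compared as the list of yielded strings).

-- ===== PORT A =====
-- A's recursion, made total with a fuel guard (fuel = |claim| + 1 always suffices;
-- the `_ => []` match arms are unreachable: split(":",1) of a string containing ':'
-- always has two pieces, and split? with a non-empty separator is always `some`).
def subClaimsGoA : Nat → String → List String
  | 0, _ => []
  | fuel + 1, claim =>
    if PySem.Str.isIn ":" claim then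
      match PySem.Str.splitMax? claim ":" 1 with
      | some (parent :: children :: _) =>
        -- children.split(":",1)[0]  (index 0 always exists: split is never empty)
        let first := PySem.List.pyGetD ((PySem.Str.splitMax? children ":" 1).getD []) 0 ""
        match PySem.Str.split? first ";" with
        | some pieces =>
          pieces.flatMap (fun child => (subClaimsGoA fuel child).map (fun s => parent ++ s))
        | none => []
      | _ => []
    else [claim]

def sub_claims (claim : String) : List String :=
  subClaimsGoA (claim.toList.length + 1) claim

-- ===== PORT B =====
def sub_claims_alt (claim : String) : List String :=
  if !PySem.Str.isIn ":" claim then [claim]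
  else
    match PySem.Str.splitMax? claim ":" 1 with
    | some (parent :: children :: _) =>
      match PySem.Str.split? (PySem.List.pyGetD ((PySem.Str.splitMax? children ":" 1).getD []) 0 "") ";" with
      | some pieces => pieces.map (fun child => parent ++ child)
      | none => []
    | _ => []

-- ===== PRECONDITION & SPEC =====
def Spec_sub_claims (claim : String) (out : List String) : Prop := out = sub_claims_alt claim
instance (claim : String) (out : List String) : Decidable (Spec_sub_claims claim out) := by unfold Spec_sub_claims; infer_instance

-- ===== CLAIM (what is proved, stated in full; the proofs are below) =====
def Claim_equal_sub_claims : Prop := ∀ (claim : String), Dom_sub_claims claim → Spec_sub_claims claim (sub_claims claim)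

-- ===== LEMMAS AND PROOFS =====

-- splitOnMax.go with maxsplit exhausted just closes the current piece with the rest.
theorem go_zero (fuel : Nat) (l cur : List Char) (acc : List (List Char)) :
    PySem.Chars.splitOnMax.go [':'] fuel 0 l cur acc = ((cur.reverse ++ l) :: acc).reverse := by
  cases fuel <;> cases l <;> simp [PySem.Chars.splitOnMax.go]

-- characterization of a single-colon split with maxsplit 1
theorem go_one (l : List Char) : ∀ (fuel : Nat) (cur : List Char) (acc : List (List Char)),
    l.length ≤ fuel →
    PySem.Chars.splitOnMax.go [':'] fuel 1 l cur acc =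
      if ':' ∈ l then
        acc.reverse ++ [cur.reverse ++ l.takeWhile (· ≠ ':'),
                        l.drop ((l.takeWhile (· ≠ ':')).length + 1)]
      else acc.reverse ++ [cur.reverse ++ l] := by
  induction l with
  | nil => intro fuel cur acc _; cases fuel <;> simp [PySem.Chars.splitOnMax.go]
  | cons c rest ih =>
    intro fuel cur acc hle
    cases fuel with
    | zero => simp at hle
    | succ f =>
      simp only [List.length_cons] at hle
      have hrest : rest.length ≤ f := by omega
      by_cases hc : c = ':'
      · subst hc
        simp [PySem.Chars.splitOnMax.go, go_zero, List.takeWhile]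
      · have h1 : ([':'].isPrefixOf (c :: rest)) = false := by
          simp [List.isPrefixOf]
          exact fun h => hc h.symm
        rw [show PySem.Chars.splitOnMax.go [':'] (f+1) 1 (c::rest) cur acc
             = PySem.Chars.splitOnMax.go [':'] f 1 rest (c::cur) acc from by
              simp [PySem.Chars.splitOnMax.go, h1]]
        rw [ih f (c :: cur) acc hrest]
        by_cases hm : ':' ∈ rest <;>
          simp [List.takeWhile, hc, hm, Ne.symm hc, List.mem_cons]

-- every character of a piece of splitOn.go comes from acc, cur or the remaining input
theorem go_split_mem (sep : List Char) : ∀ (fuel : Nat) (l cur : List Char)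
    (acc : List (List Char)) (p : List Char),
    p ∈ PySem.Chars.splitOn.go sep fuel l cur acc →
    p ∈ acc ∨ ∀ c ∈ p, c ∈ cur ∨ c ∈ l := by
  intro fuel
  induction fuel with
  | zero =>
    intro l cur acc p hp
    simp [PySem.Chars.splitOn.go] at hp
    rcases hp with h | h
    · exact Or.inl h
    · right; intro c hc; subst h; simp at hc
      rcases hc with h | h
      · exact Or.inl (by simpa using h)
      · exact Or.inr h
  | succ f ih =>
    intro l cur acc p hp
    cases l with
    | nil =>
      simp [PySem.Chars.splitOn.go] at hp
      rcases hp with h | h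
      · exact Or.inl h
      · right; intro c hc; subst h; left; simpa using hc
    | cons c rest =>
      by_cases hpre : sep.isPrefixOf (c :: rest) = true
      · simp only [PySem.Chars.splitOn.go, hpre, if_true] at hp
        rcases ih _ _ _ _ hp with h | h
        · rcases List.mem_cons.mp h with h | h
          · right; intro x hx; subst h; left; simpa using hx
          · exact Or.inl h
        · right; intro x hx
          rcases h x hx with h' | h'
          · simp at h'
          · exact Or.inr (List.mem_of_mem_drop h')
      · simp only [PySem.Chars.splitOn.go, hpre] at hp
        rcases ih _ _ _ _ hp with h | h
        · exact Or.inl h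
        · right; intro x hx
          rcases h x hx with h' | h'
          · rcases List.mem_cons.mp h' with h'' | h''
            · exact Or.inr (h'' ▸ List.mem_cons_self)
            · exact Or.inl h''
          · exact Or.inr (List.mem_cons_of_mem _ h')

theorem mem_splitOn_subset {s p : List Char} {sep : List Char}
    (hp : p ∈ PySem.Chars.splitOn s sep) : ∀ c ∈ p, c ∈ s := by
  unfold PySem.Chars.splitOn at hp
  rcases go_split_mem sep _ s [] [] p hp with h | h
  · simp at h
  · intro c hc; rcases h c hc with h' | h'
    · simp at h'
    · exact h'

-- the first piece of s.split(":", 1) contains no colon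
theorem first_piece_no_colon (s : List Char) :
    ':' ∉ PySem.List.pyGetD (PySem.Chars.splitOnMax s [':'] 1) 0 [] := by
  unfold PySem.Chars.splitOnMax
  rw [if_neg (by omega)]
  simp only [Int.toNat_one]
  rw [go_one s (s.length + 1) [] [] (by omega)]
  by_cases h : ':' ∈ s
  · simp [h, PySem.List.pyGetD, PySem.List.pyGet?, PySem.List.pyIdx?]
    intro hc
    exact (by simpa using List.mem_takeWhile_imp hc)
  · simp [h, PySem.List.pyGetD, PySem.List.pyGet?, PySem.List.pyIdx?]

-- A on a colon-free string yields just that string (with any positive fuel)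
theorem goA_no_colon (fuel : Nat) (s : String) (h : PySem.Str.isIn ":" s = false) :
    subClaimsGoA (fuel + 1) s = [s] := by
  have h2 : PySem.Chars.isIn [':'] s.toList = false := by
    simpa [PySem.Str.isIn] using h
  simp [subClaimsGoA, h2]

-- split(":",1) of a string containing ':' is exactly the two pieces
theorem splitMax_pair (s : String) (hmem : ':' ∈ s.toList) :
    PySem.Str.splitMax? s ":" 1 =
      some [String.ofList (s.toList.takeWhile (· ≠ ':')),
            String.ofList (s.toList.drop ((s.toList.takeWhile (· ≠ ':')).length + 1))] := by
  simp only [PySem.Str.splitMax?, PySem.Chars.splitMax?]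
  rw [if_neg (by simp)]
  unfold PySem.Chars.splitOnMax
  rw [if_neg (by omega)]
  simp only [Int.toNat_one]
  rw [show (":".toList) = [':'] from rfl]
  rw [go_one s.toList _ [] [] (by omega)]
  simp [hmem]

-- split(";") always succeeds
theorem split_semi (s : String) :
    PySem.Str.split? s ";" = some ((PySem.Chars.splitOn s.toList [';']).map String.ofList) := by
  simp [PySem.Str.split?, PySem.Chars.split?]

-- every child B (and A) iterates over is colon-free
theorem child_no_colon (children : String) (pieces : List String)
    (hp : PySem.Str.split? (PySem.List.pyGetD ((PySem.Str.splitMax? children ":" 1).getD []) 0 "") ";" = some pieces)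
    (child : String) (hc : child ∈ pieces) : PySem.Str.isIn ":" child = false := by
  have hfirst := first_piece_no_colon children.toList
  have hL : (PySem.Str.splitMax? children ":" 1).getD [] =
      (PySem.Chars.splitOnMax children.toList [':'] 1).map String.ofList := by
    simp [PySem.Str.splitMax?, PySem.Chars.splitMax?]
  have hne : PySem.Chars.splitOnMax children.toList [':'] 1 ≠ [] := by
    unfold PySem.Chars.splitOnMax
    rw [if_neg (by omega)]
    simp only [Int.toNat_one]
    rw [go_one children.toList _ [] [] (by omega)]
    split_ifs <;> simp
  set L := PySem.Chars.splitOnMax children.toList [':'] 1 with hLdef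
  cases hl : L with
  | nil => exact absurd hl hne
  | cons a t =>
    rw [hl] at hL
    have hFa : PySem.List.pyGetD ((PySem.Str.splitMax? children ":" 1).getD []) 0 "" = String.ofList a := by
      rw [hL]; simp [PySem.List.pyGetD, PySem.List.pyGet?, PySem.List.pyIdx?]
    rw [hFa] at hp
    have hfa : ':' ∉ a := by
      rw [hl] at hfirst
      simpa [PySem.List.pyGetD, PySem.List.pyGet?, PySem.List.pyIdx?] using hfirst
    have hpieces : pieces = (PySem.Chars.splitOn (String.ofList a).toList [';']).map String.ofList := by
      have := hp.symm
      simpa [PySem.Str.split?, PySem.Chars.split?] using this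
    rw [hpieces] at hc
    rcases List.mem_map.mp hc with ⟨q, hq, rfl⟩
    have hqsub : ∀ c ∈ q, c ∈ (String.ofList a).toList := mem_splitOn_subset hq
    have hnocolon : ':' ∉ (String.ofList q).toList := by
      simp only [String.toList_ofList] at hqsub ⊢
      intro hcq
      have := hqsub ':' hcq
      exact hfa (by simpa using this)
    have : PySem.Chars.isIn ":".toList (String.ofList q).toList = false := by
      rw [PySem.Chars.isIn_eq_false_iff]
      intro hinf
      exact hnocolon (hinf.subset (by simp))
    simpa [PySem.Str.isIn] using this

-- ===== VERDICT (by name: the statement is the Claim_ definition above) =====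
theorem sub_claims_spec : Claim_equal_sub_claims := by
  intro claim _
  unfold Spec_sub_claims sub_claims sub_claims_alt
  by_cases h : PySem.Str.isIn ":" claim
  · have hmem : ':' ∈ claim.toList := by
      have := (PySem.Str.isIn_iff_infix (sub := ":") (s := claim)).mp h
      exact this.subset (by simp)
    have hlen : 1 ≤ claim.toList.length := List.length_pos_of_mem hmem
    obtain ⟨k, hk⟩ : ∃ k, claim.toList.length = k + 1 := ⟨claim.toList.length - 1, by omega⟩
    simp only [subClaimsGoA, h, if_true, Bool.not_true, Bool.false_eq_true, if_false]
    rw [hk]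
    cases hsp : PySem.Str.splitMax? claim ":" 1 with
    | none => rw [splitMax_pair claim hmem] at hsp
    | some parts =>
      cases parts with
      | nil => rw [splitMax_pair claim hmem] at hsp
      | cons parent rest =>
        cases rest with
        | nil => rw [splitMax_pair claim hmem] at hsp
        | cons children tail =>
          dsimp only
          cases hp : PySem.Str.split? (PySem.List.pyGetD ((PySem.Str.splitMax? children ":" 1).getD []) 0 "") ";" with
          | none => rw [split_semi] at hp
          | some pieces =>
            have hchild : ∀ child ∈ pieces, subClaimsGoA (k + 1) child = [child] := by
              intro child hc
              exact goA_no_colon k child (child_no_colon children pieces hp child hc)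
            have key : ∀ (l : List String), (∀ c ∈ l, subClaimsGoA (k + 1) c = [c]) →
                l.flatMap (fun child => (subClaimsGoA (k + 1) child).map (fun s => parent ++ s))
                  = l.map (fun child => parent ++ child) := by
              intro l hl
              induction l with
              | nil => rfl
              | cons x xs ihx =>
                simp only [List.flatMap_cons, List.map_cons]
                rw [hl x List.mem_cons_self, ihx (fun c hc => hl c (List.mem_cons_of_mem _ hc))]
                simp
            dsimp only
            exact key pieces hchild
  · have h2 : PySem.Chars.isIn [':'] claim.toList = false := by
      simpa [PySem.Str.isIn] using (by simpa using h : PySem.Str.isIn ":" claim = false)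
    simp [subClaimsGoA, h2]
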